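-- pv_equiv track=rewrite | github.com/jboscomendoza/comic-superpowers | 03_scrape_properties.py | dividir_grupos
-- ===== SOURCE A (Python) =====
-- def dividir_grupos(lista, cantidad=50):
--     divisiones = []
--     for i in range(0, len(lista), cantidad):
--         x = i
--         ls = lista[x:x+cantidad]
--         ls = "|".join(ls)
--         divisiones.append(ls)
--     return divisiones
-- ===== SOURCE B (Python) =====
-- def dividir_grupos(lista, cantidad=50):
--     divisiones = []
--     buffer = []
--     for elem in lista:
--         buffer.append(elem)
--         if len(buffer) == cantidad:
--             divisiones.append("|".join(buffer))
--             buffer = []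
--     if buffer:
--         divisiones.append("|".join(buffer))
--     return divisiones
-- ===== Notes on version B (the rewrite author's own statement) =====
-- stated objective: alternative
-- what changed: Replaces index arithmetic over range(0, len, cantidad) plus list slicing by a single streaming pass over the elements that accumulates a buffer and flushes it (joined with '|') each time it reaches cantidad, with a final flush of the partial chunk.
-- outside the precondition, e.g. on dividir_grupos(['a'], -1): A returns [], B returns ['a']; on dividir_grupos(['a'], 0): A raises ValueError, B returns ['a']
import Mathlib
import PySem

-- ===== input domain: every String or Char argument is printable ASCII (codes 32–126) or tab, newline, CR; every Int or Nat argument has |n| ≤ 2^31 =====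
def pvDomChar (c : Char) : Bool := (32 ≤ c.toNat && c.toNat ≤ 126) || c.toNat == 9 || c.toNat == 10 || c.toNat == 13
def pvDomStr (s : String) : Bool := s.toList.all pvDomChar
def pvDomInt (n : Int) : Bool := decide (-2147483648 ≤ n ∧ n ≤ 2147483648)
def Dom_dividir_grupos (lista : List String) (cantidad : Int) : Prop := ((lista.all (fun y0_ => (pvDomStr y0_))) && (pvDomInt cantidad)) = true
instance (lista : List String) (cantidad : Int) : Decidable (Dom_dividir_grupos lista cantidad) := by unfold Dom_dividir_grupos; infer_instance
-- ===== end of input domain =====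

-- B replaces A's index-arithmetic-plus-slicing over range(0, len, cantidad) by a single
-- streaming pass that buffers elements and flushes the '|'-joined buffer whenever it
-- reaches cantidad (alternative decomposition, same cost).

-- ===== PORT A =====
def dividir_grupos (lista : List String) (cantidad : Int) : List String :=
  (PySem.List.pyRange 0 (lista.length : Int) cantidad).foldl
    (fun divisiones i =>
      let x := i
      let ls := PySem.List.slice lista (some x) (some (x + cantidad))
      let ls := PySem.Str.join "|" ls
      divisiones ++ [ls]) []

-- ===== PORT B =====
-- one step of B's loop body: append elem to the buffer, flush when it reaches cantidad
def pvStepB (cantidad : Int) (st : List String × List String) (elem : String) :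
    List String × List String :=
  let buffer := st.2 ++ [elem]
  if (buffer.length : Int) = cantidad then (st.1 ++ [PySem.Str.join "|" buffer], [])
  else (st.1, buffer)

def dividir_grupos_alt (lista : List String) (cantidad : Int) : List String :=
  let st := lista.foldl (pvStepB cantidad) ([], [])
  if st.2 ≠ [] then st.1 ++ [PySem.Str.join "|" st.2] else st.1

-- ===== PRECONDITION & SPEC =====
-- Pre_ restricts to the natural domain of positive chunk sizes: for cantidad = 0 A raises
-- ValueError (range step 0), and for negative cantidad A's empty result is an artefact of
-- range with a negative step on a nonsense input.
def Pre_dividir_grupos (lista : List String) (cantidad : Int) : Prop := 1 ≤ cantidad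
instance (lista : List String) (cantidad : Int) : Decidable (Pre_dividir_grupos lista cantidad) := by unfold Pre_dividir_grupos; infer_instance
def pvWitness_dividir_grupos : List String × Int := (["a", "b", "c"], 2)

def Spec_dividir_grupos (lista : List String) (cantidad : Int) (out : List String) : Prop := out = dividir_grupos_alt lista cantidad
instance (lista : List String) (cantidad : Int) (out : List String) : Decidable (Spec_dividir_grupos lista cantidad out) := by unfold Spec_dividir_grupos; infer_instance

-- ===== CLAIM (what is proved, stated in full; the proofs are below) =====
def Claim_equal_dividir_grupos : Prop := ∀ (lista : List String) (cantidad : Int), Dom_dividir_grupos lista cantidad → Pre_dividir_grupos lista cantidad → Spec_dividir_grupos lista cantidad (dividir_grupos lista cantidad)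

-- ===== LEMMAS AND PROOFS =====

-- reference chunking: groups of size c+1, '|'-joined
def chunkBy (c : Nat) (l : List String) : List String :=
  if l = [] then []
  else PySem.Str.join "|" (l.take (c + 1)) :: chunkBy c (l.drop (c + 1))
termination_by l.length
decreasing_by
  rename_i h
  cases l with
  | nil => exact absurd rfl h
  | cons x xs => simp

theorem chunkBy_nil (c : Nat) : chunkBy c [] = [] := by
  rw [chunkBy]
  simp

theorem chunkBy_eq (c : Nat) (l : List String) (hl : l ≠ []) :
    chunkBy c l = PySem.Str.join "|" (l.take (c + 1)) :: chunkBy c (l.drop (c + 1)) := by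
  rw [chunkBy, if_neg hl]

theorem foldl_push {α β : Type} (f : α → β) :
    ∀ (l : List α) (init : List β),
      l.foldl (fun acc i => acc ++ [f i]) init = init ++ l.map f := by
  intro l
  induction l with
  | nil => simp
  | cons a l ih => intro init; simp [List.foldl_cons, ih]

theorem pyRange_zero_nonpos {b s : Int} (hs : 0 < s) (hb : b ≤ 0) :
    PySem.List.pyRange 0 b s = [] := by
  rw [PySem.List.pyRange_of_pos _ _ hs]
  have : ¬ ((0 : Int) < b) := by omega
  simp [this]

theorem pyRange_pos_cons {b s : Int} (hs : 0 < s) (hb : 0 < b) :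
    PySem.List.pyRange 0 b s = 0 :: (PySem.List.pyRange 0 (b - s) s).map (· + s) := by
  rw [PySem.List.pyRange_of_pos _ _ hs, PySem.List.pyRange_of_pos _ _ hs]
  have hcount : (if (0:Int) < b then ((b - 0 + s - 1) / s).toNat else 0)
      = (if (0:Int) < b - s then ((b - s - 0 + s - 1) / s).toNat else 0) + 1 := by
    rw [if_pos hb]
    by_cases hbs : (0:Int) < b - s
    · rw [if_pos hbs]
      have h1 : b - 0 + s - 1 = (b - 1) + 1 * s := by ring
      have h2 : (b - 0 + s - 1) / s = (b - 1) / s + 1 := by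
        rw [h1, Int.add_mul_ediv_right _ _ (by omega : s ≠ 0)]
      have h3 : 0 ≤ (b - 1) / s := Int.ediv_nonneg (by omega) (by omega)
      have h4 : b - s - 0 + s - 1 = b - 1 := by ring
      rw [h2, h4]
      omega
    · rw [if_neg hbs]
      have h1 : (b - 0 + s - 1) / s = (b - 0 + s - 1 - 1 * s) / s + 1 := by
        rw [eq_comm, ← Int.add_mul_ediv_right _ _ (by omega : s ≠ 0)]
        ring_nf
      have h2 : (b - 0 + s - 1 - 1 * s) / s = 0 :=
        Int.ediv_eq_zero_of_lt (by omega) (by omega)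
      rw [h1, h2]
      simp
  rw [hcount, List.range_succ_eq_map]
  simp only [List.map_cons, List.map_map]
  congr 1
  · simp
  · apply List.map_congr_left
    intro k _
    simp only [Function.comp, Nat.succ_eq_add_one]
    push_cast
    ring

theorem A_map_eq_chunkBy (c : Nat) (hc : 0 < c) (l : List String) :
    (PySem.List.pyRange 0 (l.length : Int) (c : Int)).map
      (fun i => PySem.Str.join "|" (PySem.List.slice l (some i) (some (i + (c : Int)))))
      = chunkBy (c - 1) l := by
  have hcs : (0 : Int) < (c : Int) := by exact_mod_cast hc
  cases l with
  | nil =>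
      rw [pyRange_zero_nonpos hcs (by simp), chunkBy_nil]
      simp
  | cons x xs =>
      have hb : (0 : Int) < (((x :: xs).length : Nat) : Int) := by
        simp
      rw [pyRange_pos_cons hcs hb]
      rw [List.map_cons, List.map_map]
      have hhead : PySem.Str.join "|" (PySem.List.slice (x :: xs) (some 0) (some (0 + (c : Int))))
          = PySem.Str.join "|" ((x :: xs).take c) := by
        have h0 : ((0 : Nat) : Int) = (0 : Int) := by norm_num
        rw [zero_add, ← h0, ← PySem.List.slice_to_natCast]
        simp
      have htail :
          ((PySem.List.pyRange 0 (((x :: xs).length : Int) - (c : Int)) (c : Int)).map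
            ((fun i => PySem.Str.join "|" (PySem.List.slice (x :: xs) (some i) (some (i + (c : Int))))) ∘ (· + (c : Int))))
          = chunkBy (c - 1) ((x :: xs).drop c) := by
        by_cases hcn : c ≤ (x :: xs).length
        · have hlen : (((x :: xs).length : Int) - (c : Int)) = (((x :: xs).drop c).length : Int) := by
            rw [List.length_drop]
            omega
          rw [hlen, ← A_map_eq_chunkBy c hc ((x :: xs).drop c)]
          apply List.map_congr_left
          intro i hi
          have hnn : 0 ≤ i := by
            rcases (PySem.List.mem_pyRange_iff_of_pos hcs _).mp hi with ⟨h1, -, -⟩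
            exact h1
          obtain ⟨k, rfl⟩ := Int.eq_ofNat_of_zero_le hnn
          simp only [Function.comp]
          have e1 : ((k : Int) + (c : Int)) = (((k + c : Nat)) : Int) := by push_cast; ring
          have e3 : (((k + c : Nat)) : Int) + (c : Int) = (((k + c + c : Nat)) : Int) := by
            push_cast; ring
          have hdd : List.drop k (List.drop c (x :: xs)) = List.drop (k + c) (x :: xs) := by
            rw [List.drop_drop, Nat.add_comm c k]
          have ha1 : k + c + c - (k + c) = c := by omega
          have ha2 : k + c - k = c := by omega
          rw [e1, e3, PySem.List.slice_natCast, PySem.List.slice_natCast, hdd, ha1, ha2]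
        · have h1 : (((x :: xs).length : Int) - (c : Int)) ≤ 0 := by
            omega
          have h2 : (x :: xs).drop c = [] := List.drop_eq_nil_of_le (by omega)
          rw [pyRange_zero_nonpos hcs h1, h2, chunkBy_nil]
          simp
      rw [hhead, htail, chunkBy_eq (c - 1) (x :: xs) (by simp)]
      have hc1 : c - 1 + 1 = c := by omega
      rw [hc1]
termination_by l.length
decreasing_by simp; omega

theorem B_flush_foldl (c : Nat) (hc : 0 < c) :
    ∀ (l div buf : List String), buf.length < c →
      (let st := l.foldl (pvStepB (c : Int)) (div, buf)
       if st.2 ≠ [] then st.1 ++ [PySem.Str.join "|" st.2] else st.1)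
      = div ++ chunkBy (c - 1) (buf ++ l) := by
  intro l
  induction l with
  | nil =>
      intro div buf hbuf
      cases buf with
      | nil => simp [chunkBy_nil]
      | cons y ys =>
          simp only [List.foldl_nil, List.append_nil]
          rw [chunkBy_eq (c - 1) (y :: ys) (by simp)]
          have hc1 : c - 1 + 1 = c := by omega
          have ht : (y :: ys).take (c - 1 + 1) = y :: ys := by
            rw [hc1]; exact List.take_of_length_le (by omega)
          have hd : (y :: ys).drop (c - 1 + 1) = [] := by
            rw [hc1]; exact List.drop_eq_nil_of_le (by omega)
          rw [ht, hd, chunkBy_nil]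
          simp
  | cons a l ih =>
      intro div buf hbuf
      simp only [List.foldl_cons]
      by_cases hfull : (buf ++ [a]).length = c
      · have hstep : pvStepB (c : Int) (div, buf) a
            = (div ++ [PySem.Str.join "|" (buf ++ [a])], []) := by
          simp only [pvStepB]
          rw [if_pos (by exact_mod_cast congrArg (Nat.cast : Nat → Int) hfull)]
        rw [hstep, ih _ _ (by simpa using hc)]
        rw [chunkBy_eq (c - 1) (buf ++ a :: l) (by simp)]
        have hc1 : c - 1 + 1 = c := by omega
        have hba : buf ++ a :: l = (buf ++ [a]) ++ l := by simp
        have ht : (buf ++ a :: l).take c = buf ++ [a] := by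
          rw [hba, ← hfull, List.take_left]
        have hd : (buf ++ a :: l).drop c = l := by
          rw [hba, ← hfull, List.drop_left]
        rw [hc1, ht, hd]
        simp
      · have hstep : pvStepB (c : Int) (div, buf) a = (div, buf ++ [a]) := by
          simp only [pvStepB]
          rw [if_neg (by
            intro h
            exact hfull (by exact_mod_cast h))]
        rw [hstep, ih _ _ (by simp at hfull ⊢; omega)]
        simp

-- ===== VERDICT (by name: the statement is the Claim_ definition above) =====
theorem dividir_grupos_spec : Claim_equal_dividir_grupos := by
  intro lista cantidad _ hpre
  unfold Spec_dividir_grupos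
  have hpos : 0 < cantidad := hpre
  obtain ⟨c, rfl⟩ := Int.eq_ofNat_of_zero_le (le_of_lt hpos)
  have hc : 0 < c := by exact_mod_cast hpos
  unfold dividir_grupos dividir_grupos_alt
  rw [foldl_push, List.nil_append, A_map_eq_chunkBy c hc lista]
  have := B_flush_foldl c hc lista [] [] (by simpa using hc)
  simpa using this.symm
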